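-- pv_equiv track=rewrite | github.com/Nghia03092004/nghia03092004.github.io | project_euler/problem_488/solution.py | compute_grundy
-- ===== SOURCE A (Python) =====
-- def compute_grundy(max_h: int) -> list:
--     """Compute Grundy values G(0), G(1), ..., G(max_h) for unbalanced Nim."""
--     G = [0] * (max_h + 1)
--     for h in range(2, max_h + 1):
--         # From h, can move to positions ceil(h/2) .. h-1
--         low = (h + 1) // 2  # ceil(h/2)
--         high = h - 1
--         reachable = set()
--         for j in range(low, high + 1):
--             reachable.add(G[j])
--         # mex: smallest non-negative integer not in reachable
--         mex = 0
--         while mex in reachable: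
--             mex += 1
--         G[h] = mex
--     return G
-- ===== SOURCE B (Python) =====
-- def compute_grundy(max_h: int) -> list:
--     """Compute Grundy values G(0), G(1), ..., G(max_h) for unbalanced Nim.
--
--     Closed form: repeatedly replace an odd h by h // 2; once even, the
--     Grundy value is h // 2.  O(log h) per entry, no window scan.
--     """
--     def g(h: int) -> int:
--         while h % 2 == 1:
--             h //= 2
--         return h // 2
--
--     return [g(h) for h in range(max_h + 1)]
-- ===== Notes on version B (the rewrite author's own statement) =====
-- stated objective: faster
-- what changed: Replaces the per-h window scan plus mex search with a proven closed form: G(h) is obtained by halving h while it is odd and then taking h//2, computed independently per entry.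
import Mathlib
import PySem

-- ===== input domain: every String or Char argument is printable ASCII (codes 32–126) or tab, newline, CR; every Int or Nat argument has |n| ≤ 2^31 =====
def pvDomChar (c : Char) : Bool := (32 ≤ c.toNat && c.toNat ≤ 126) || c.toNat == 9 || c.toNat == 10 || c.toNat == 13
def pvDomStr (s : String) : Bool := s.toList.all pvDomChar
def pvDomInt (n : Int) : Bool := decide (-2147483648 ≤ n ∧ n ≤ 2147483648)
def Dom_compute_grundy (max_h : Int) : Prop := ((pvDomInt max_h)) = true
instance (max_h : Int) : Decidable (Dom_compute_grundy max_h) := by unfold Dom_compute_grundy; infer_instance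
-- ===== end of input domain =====

-- B replaces A's per-h window scan + mex search by a proven closed form per entry
-- (halve h while odd, then h // 2); measured asymptotically faster.

-- ===== PORT A =====
-- 'while mex in reachable: mex += 1'; fuel = window length + 1 always suffices
-- (the mex of a set built from w values is ≤ w), so the port is exact.
-- The Python list G is ported as Array Int and the Python set as Std.HashSet,
-- matching Python's O(1) indexing / set operations; same loops, same state.
def pvMexLoop (reachable : Std.HashSet Int) : Nat → Int → Int
  | 0, mex => mex
  | fuel + 1, mex =>
      if reachable.contains mex then pvMexLoop reachable fuel (mex + 1) else mex

-- 'for j in range(low, high+1): reachable.add(G[j])', iterating j directly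
-- (Python ranges are lazy; no list is materialized)
def pvReachLoop (G : Array Int) (high : Int) (j : Int) (s : Std.HashSet Int) : Std.HashSet Int :=
  if j ≤ high then pvReachLoop G high (j + 1) (s.insert (G.getD j.toNat 0)) else s
termination_by (high + 1 - j).toNat
decreasing_by omega

-- one iteration of A's 'for h' loop; the indices j and h are always
-- nonnegative and below len G when called from compute_grundy, so
-- .toNat / getD / setIfInBounds are exact there
def pvStepA (G : Array Int) (h : Int) : Array Int :=
  let low := PySem.Int.floordiv (h + 1) 2
  let high := h - 1
  let reachable := pvReachLoop G high low (∅ : Std.HashSet Int)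
  let mex := pvMexLoop reachable ((high + 1 - low).toNat + 1) 0
  G.setIfInBounds h.toNat mex

def compute_grundy (max_h : Int) : List Int :=
  let G := Array.replicate (max_h + 1).toNat (0 : Int)
  ((PySem.List.pyRange 2 (max_h + 1) 1).foldl pvStepA G).toList

-- ===== PORT B =====
-- Source B's inner 'g': while h odd, h //= 2; then h // 2.  All h drawn from
-- range(max_h+1) are nonnegative, where the Nat version is exact.
def pvG (h : Nat) : Nat :=
  if h % 2 = 1 then pvG (h / 2) else h / 2
termination_by h
decreasing_by omega

def compute_grundy_alt (max_h : Int) : List Int :=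
  (PySem.List.pyRange 0 (max_h + 1) 1).map (fun h => (pvG h.toNat : Int))

-- ===== PRECONDITION & SPEC =====
def Spec_compute_grundy (max_h : Int) (out : List Int) : Prop := out = compute_grundy_alt max_h
instance (max_h : Int) (out : List Int) : Decidable (Spec_compute_grundy max_h out) := by unfold Spec_compute_grundy; infer_instance

-- ===== CLAIM (what is proved, stated in full; the proofs are below) =====
def Claim_equal_compute_grundy : Prop := ∀ (max_h : Int), Dom_compute_grundy max_h → Spec_compute_grundy max_h (compute_grundy max_h)

-- ===== LEMMAS AND PROOFS =====

theorem pvG_even (m : Nat) : pvG (2 * m) = m := by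
  rw [pvG]; simp [Nat.mul_mod_right]

theorem pvG_odd (m : Nat) : pvG (2 * m + 1) = pvG m := by
  rw [pvG]; simp [Nat.mul_add_div]

theorem pvG_le (h : Nat) : pvG h ≤ h / 2 := by
  induction h using Nat.strong_induction_on with
  | _ h IH =>
    rw [pvG]
    split
    · rename_i hodd
      exact le_trans (IH (h / 2) (by omega)) (by omega)
    · exact le_refl _

theorem pvG_zero : pvG 0 = 0 := by simpa using pvG_even 0

theorem pvG_one : pvG 1 = 0 := by
  have := pvG_odd 0
  simpa [pvG_zero] using this

-- the set of Grundy values reachable from h (indices ceil(h/2) .. h-1)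
def pvM (h v : Nat) : Prop := ∃ j, (h + 1) / 2 ≤ j ∧ j < h ∧ pvG j = v

-- characterization of the reachable-value set: exactly {0..(h-1)/2} minus {pvG h}
theorem pvM_char : ∀ h, 2 ≤ h → ∀ v, (pvM h v ↔ v ≤ (h - 1) / 2 ∧ v ≠ pvG h) := by
  intro h
  induction h using Nat.strong_induction_on with
  | _ h IH =>
  intro h2 v
  rcases Nat.even_or_odd h with ⟨k, hk⟩ | ⟨k, hk⟩
  · -- h = 2 * k, k ≥ 1
    replace hk : h = 2 * k := by omega
    subst hk
    have hk1 : 1 ≤ k := by omega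
    have ghk : pvG (2 * k) = k := pvG_even k
    rw [ghk]
    constructor
    · rintro ⟨j, hj1, hj2, hj3⟩
      rcases Nat.even_or_odd j with ⟨m, hm⟩ | ⟨m, hm⟩
      · replace hm : j = 2 * m := by omega
        subst hm
        rw [pvG_even] at hj3
        omega
      · subst hm
        rw [pvG_odd] at hj3
        have := pvG_le m
        omega
    · rintro ⟨hv1, hv2⟩
      by_cases hbig : (k + 1) / 2 ≤ v
      · exact ⟨2 * v, by omega, by omega, pvG_even v⟩
      · by_cases hveq : v = pvG k
        · rcases Nat.even_or_odd k with ⟨t, ht⟩ | ⟨t, ht⟩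
          · replace ht : k = 2 * t := by omega
            subst ht
            rw [pvG_even] at hveq
            omega
          · subst ht
            exact ⟨2 * t + 1, by omega, by omega, hveq.symm⟩
        · by_cases hk2 : 2 ≤ k
          · obtain ⟨m, hm1, hm2, hm3⟩ :=
              (IH k (by omega) hk2 v).mpr ⟨by omega, hveq⟩
            exact ⟨2 * m + 1, by omega, by omega, by rw [pvG_odd]; exact hm3⟩
          · -- k = 1, h = 2: the window is {1} and pvG 1 = 0
            have hkeq : k = 1 := by omega
            subst hkeq
            exact ⟨1, by omega, by omega, by rw [pvG_one]; omega⟩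
  · -- h = 2 * k + 1, k ≥ 1
    subst hk
    have hk1 : 1 ≤ k := by omega
    have ghk : pvG (2 * k + 1) = pvG k := pvG_odd k
    rw [ghk]
    constructor
    · rintro ⟨j, hj1, hj2, hj3⟩
      rcases Nat.even_or_odd j with ⟨m, hm⟩ | ⟨m, hm⟩
      · replace hm : j = 2 * m := by omega
        subst hm
        rw [pvG_even] at hj3
        have := pvG_le k
        omega
      · subst hm
        rw [pvG_odd] at hj3
        have hk2 : 2 ≤ k := by omega
        obtain ⟨hv1, hv2⟩ := (IH k (by omega) hk2 v).mp ⟨m, by omega, by omega, hj3⟩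
        exact ⟨by omega, hv2⟩
    · rintro ⟨hv1, hv2⟩
      by_cases hbig : k / 2 + 1 ≤ v
      · exact ⟨2 * v, by omega, by omega, pvG_even v⟩
      · have hk2 : 2 ≤ k := by
          by_contra hcon
          have hkeq : k = 1 := by omega
          subst hkeq
          rw [pvG_one] at hv2
          omega
        have hvle : v ≤ (k - 1) / 2 := by
          rcases Nat.even_or_odd k with ⟨t, ht⟩ | ⟨t, ht⟩
          · replace ht : k = 2 * t := by omega
            subst ht
            rw [pvG_even] at hv2
            omega
          · omega
        obtain ⟨m, hm1, hm2, hm3⟩ := (IH k (by omega) hk2 v).mpr ⟨hvle, hv2⟩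
        exact ⟨2 * m + 1, by omega, by omega, by rw [pvG_odd]; exact hm3⟩

theorem pvMexLoop_eq (s : Std.HashSet Int) (t : Nat)
    (hmem : ∀ v : Nat, v < t → s.contains (v : Int) = true)
    (ht : s.contains (t : Int) = false) :
    ∀ fuel m : Nat, m ≤ t → t - m < fuel → pvMexLoop s fuel (m : Int) = t := by
  intro fuel
  induction fuel with
  | zero => intro m hm hf; omega
  | succ fuel IH =>
    intro m hm hf
    by_cases hmt : m = t
    · subst hmt
      rw [pvMexLoop, ht]
      simp
    · have hc := hmem m (by omega)
      rw [pvMexLoop, hc]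
      simp only []
      rw [show ((m : Int) + 1) = (((m + 1 : Nat)) : Int) by push_cast; ring]
      exact IH (m + 1) (by omega) (by omega)

theorem pvMem_reachLoop (G : Array Int) (high : Int) :
    ∀ j : Int, ∀ s : Std.HashSet Int, ∀ x : Int,
      x ∈ pvReachLoop G high j s ↔ x ∈ s ∨ ∃ i : Int, j ≤ i ∧ i ≤ high ∧ G.getD i.toNat 0 = x := by
  intro j s x
  induction j, s using pvReachLoop.induct G high with
  | case1 j s hj IH =>
    rw [pvReachLoop, if_pos hj, IH]
    simp only [Std.HashSet.mem_insert, beq_iff_eq]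
    constructor
    · rintro ((h | h) | ⟨i, hi1, hi2, hi3⟩)
      · exact Or.inr ⟨j, le_refl j, hj, h⟩
      · exact Or.inl h
      · exact Or.inr ⟨i, by omega, hi2, hi3⟩
    · rintro (h | ⟨i, hi1, hi2, hi3⟩)
      · exact Or.inl (Or.inr h)
      · by_cases hij : i = j
        · exact Or.inl (Or.inl (hij ▸ hi3))
        · exact Or.inr ⟨i, by omega, hi2, hi3⟩
  | case2 j s hj =>
    rw [pvReachLoop, if_neg hj]
    constructor
    · exact Or.inl
    · rintro (h | ⟨i, hi1, hi2, hi3⟩)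
      · exact h
      · omega

-- the partially-filled table: entries below k already carry their Grundy value
def pvT (n k : Nat) : List Int :=
  (List.range n).map (fun j => if j < k then (pvG j : Int) else 0)

theorem pvT_length (n k : Nat) : (pvT n k).length = n := by simp [pvT]

theorem pvT_getD (n k j : Nat) (hj : j < n) :
    (pvT n k).toArray.getD j 0 = if j < k then (pvG j : Int) else 0 := by
  have hlen : j < (pvT n k).length := by simpa [pvT_length] using hj
  simp only [Array.getD]
  rw [dif_pos (by simpa using hlen)]
  simp [pvT]

theorem pvStepA_eq (n k : Nat) (h2 : 2 ≤ k) (hk : k < n) :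
    pvStepA (pvT n k).toArray (k : Int) = (pvT n (k + 1)).toArray := by
  have hGle := pvG_le k
  simp only [pvStepA]
  rw [show ((k : Int) + 1) = (((k + 1 : Nat)) : Int) by push_cast; ring,
    show (2 : Int) = ((2 : Nat) : Int) by norm_num,
    PySem.Int.floordiv_natCast,
    show ((k : Int) - 1 + 1) = (k : Int) by ring]
  have hset : ∀ x : Int,
      (pvReachLoop (pvT n k).toArray ((k : Int) - 1) (((k + 1) / 2 : Nat) : Int)
        (∅ : Std.HashSet Int)).contains x = true
      ↔ ∃ jn : Nat, (k + 1) / 2 ≤ jn ∧ jn < k ∧ (pvG jn : Int) = x := by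
    intro x
    rw [Std.HashSet.contains_iff_mem, pvMem_reachLoop]
    constructor
    · rintro (habs | ⟨j, hj1, hj2, hj3⟩)
      · exact absurd habs Std.HashSet.not_mem_empty
      · have hj0 : 0 ≤ j := le_trans (by positivity) hj1
        lift j to Nat using hj0 with jn
        have hjn2 : jn < k := by exact_mod_cast (show (jn : Int) < (k : Int) by omega)
        rw [Int.toNat_natCast, pvT_getD n k jn (by omega)] at hj3
        refine ⟨jn, by exact_mod_cast hj1, hjn2, ?_⟩
        simpa [hjn2] using hj3
    · rintro ⟨jn, hj1, hj2, hj3⟩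
      refine Or.inr ⟨(jn : Int), by exact_mod_cast hj1, by omega, ?_⟩
      rw [Int.toNat_natCast, pvT_getD n k jn (by omega)]
      simpa [hj2] using hj3
  have hmex :
      pvMexLoop
        (pvReachLoop (pvT n k).toArray ((k : Int) - 1) (((k + 1) / 2 : Nat) : Int)
          (∅ : Std.HashSet Int))
        (((k : Int) - (((k + 1) / 2 : Nat) : Int)).toNat + 1) 0 = (pvG k : Int) := by
    have hmemv : ∀ v : Nat, v < pvG k →
        (pvReachLoop (pvT n k).toArray ((k : Int) - 1) (((k + 1) / 2 : Nat) : Int)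
          (∅ : Std.HashSet Int)).contains (v : Int) = true := by
      intro v hv
      rw [hset]
      obtain ⟨j, hj1, hj2, hj3⟩ := (pvM_char k h2 v).mpr ⟨by omega, by omega⟩
      exact ⟨j, hj1, hj2, by exact_mod_cast hj3⟩
    have hnot :
        (pvReachLoop (pvT n k).toArray ((k : Int) - 1) (((k + 1) / 2 : Nat) : Int)
          (∅ : Std.HashSet Int)).contains ((pvG k : Nat) : Int) = false := by
      rw [← Bool.not_eq_true, hset]
      rintro ⟨j, hj1, hj2, hj3⟩
      have hM : pvM k (pvG k) := ⟨j, hj1, hj2, by exact_mod_cast hj3⟩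
      exact ((pvM_char k h2 _).mp hM).2 rfl
    have := pvMexLoop_eq _ (pvG k) hmemv hnot
      ((((k : Int) - (((k + 1) / 2 : Nat) : Int)).toNat + 1)) 0 (by omega) (by omega)
    simpa using this
  rw [hmex, Int.toNat_natCast]
  have hsetarr : (pvT n k).toArray.setIfInBounds k ((pvG k : Nat) : Int)
      = ((pvT n k).set k ((pvG k : Nat) : Int)).toArray := by simp
  rw [hsetarr]
  congr 1
  apply List.ext_getElem
  · simp [pvT]
  · intro i h1 h2'
    rw [List.getElem_set]
    simp only [pvT, List.getElem_map, List.getElem_range]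
    by_cases hik : i = k
    · simp [hik]
    · rw [if_neg (by omega : ¬ k = i)]
      split_ifs with hb hc
      · rfl
      · omega
      · omega
      · rfl

theorem pvLoopA (n : Nat) : ∀ K, 2 ≤ K → K ≤ n →
    (PySem.List.pyRange 2 (K : Int) 1).foldl pvStepA (pvT n 2).toArray = (pvT n K).toArray := by
  intro K hK
  induction K, hK using Nat.le_induction with
  | base =>
    intro _
    rw [show ((2 : Nat) : Int) = (2 : Int) by norm_num,
      PySem.List.pyRange_one_eq_nil (le_refl 2)]
    rfl
  | succ K hK IH =>
    intro hKn
    rw [show (((K + 1 : Nat)) : Int) = ((K : Int) + 1) by push_cast; ring,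
      PySem.List.pyRange_one_succ_right (by exact_mod_cast hK),
      List.foldl_append, IH (by omega)]
    simpa using pvStepA_eq n K hK (by omega)

theorem pvRepl (n : Nat) : Array.replicate n (0 : Int) = (pvT n 2).toArray := by
  rw [← List.toArray_replicate]
  congr 1
  apply List.ext_getElem
  · simp [pvT]
  · intro i h1 h2
    simp only [pvT, List.getElem_replicate, List.getElem_map, List.getElem_range]
    split_ifs with hi
    · interval_cases i
      · rw [pvG_zero]; rfl
      · rw [pvG_one]; rfl
    · rfl

theorem pvAlt_eq (max_h : Int) : compute_grundy_alt max_h = pvT (max_h + 1).toNat (max_h + 1).toNat := by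
  unfold compute_grundy_alt pvT
  rw [PySem.List.pyRange_zero]
  rw [List.map_map]
  apply List.map_congr_left
  intro j hj
  have hjn : j < (max_h + 1).toNat := List.mem_range.mp hj
  simp [hjn]

-- ===== VERDICT (by name: the statement is the Claim_ definition above) =====
theorem compute_grundy_spec : Claim_equal_compute_grundy := by
  unfold Claim_equal_compute_grundy Spec_compute_grundy
  intro max_h _
  rw [pvAlt_eq]
  simp only [compute_grundy]
  rw [pvRepl]
  by_cases hbig : 3 ≤ (max_h + 1).toNat
  · obtain ⟨n, hn⟩ : ∃ n : Nat, max_h + 1 = (n : Int) := ⟨(max_h + 1).toNat, by omega⟩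
    have hn3 : 3 ≤ n := by omega
    rw [hn]
    simp only [Int.toNat_natCast]
    rw [pvLoopA n n (by omega) (le_refl n), List.toList_toArray]
  · rw [PySem.List.pyRange_one_eq_nil (by omega)]
    simp only [List.foldl_nil, List.toList_toArray]
    unfold pvT
    apply List.map_congr_left
    intro j hj
    have := List.mem_range.mp hj
    have hj2 : j < 2 := by omega
    simp [hj2, show j < (max_h + 1).toNat from this]
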